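-- pv_equiv track=rewrite | github.com/Cured-2000/3550_proj_3 | 3550_proj_3.py | to_blocks
-- ===== SOURCE A (Python) =====
-- def to_blocks(plain_text):
--     many_blocks = []
--     block_text = []
--     # if not a 4x4 block then add padding
--     if len(plain_text)% 16 != 0:
--         padding = 16 - len(plain_text)% 16
--         for j in range(padding):
--             plain_text += 'A'
--     # otherwise append the 4x4 blocks to a list
--     for i in range(0, len(plain_text), 4):
--
--         block_text.append(plain_text[i: i + 4])
--
--     for i in range(0,len(block_text),4):
--         many_blocks.append(block_text[i: i+4])
--     return many_blocks
-- ===== SOURCE B (Python) =====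
-- def to_blocks(plain_text):
--     if len(plain_text) % 16 != 0:
--         plain_text += 'A' * (16 - len(plain_text) % 16)
--     blocks = []
--     for i in range(0, len(plain_text), 16):
--         blocks.append([plain_text[i + j: i + j + 4] for j in range(0, 16, 4)])
--     return blocks
-- ===== Notes on version B (the rewrite author's own statement) =====
-- stated objective: simpler
-- what changed: B pads with a single string multiplication and builds each 4x4 block directly from 16-character windows in one pass, eliminating A's intermediate flat list of 4-char chunks, its second regrouping pass, and its char-by-char padding loop.
import Mathlib
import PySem

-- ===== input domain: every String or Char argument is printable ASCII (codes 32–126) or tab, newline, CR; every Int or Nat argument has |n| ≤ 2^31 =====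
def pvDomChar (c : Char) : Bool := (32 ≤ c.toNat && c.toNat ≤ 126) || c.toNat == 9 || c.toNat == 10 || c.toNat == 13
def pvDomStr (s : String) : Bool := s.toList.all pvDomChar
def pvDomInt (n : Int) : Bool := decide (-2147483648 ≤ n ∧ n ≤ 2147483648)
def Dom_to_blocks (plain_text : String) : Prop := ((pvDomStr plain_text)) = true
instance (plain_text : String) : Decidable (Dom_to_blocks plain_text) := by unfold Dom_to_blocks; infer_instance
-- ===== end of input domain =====

-- B pads in one string multiplication and builds each 4x4 block directly from 16-char
-- windows in a single pass, instead of A's flat 4-chunk list plus a second regrouping pass.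

-- ===== PORT A =====
def to_blocks (plain_text : String) : List (List String) :=
  let pt0 := plain_text.toList
  -- if not a 4x4 block then add padding (the char-by-char append loop)
  let pt :=
    if pt0.length % 16 ≠ 0 then
      (List.range (16 - pt0.length % 16)).foldl (fun acc _ => acc ++ ['A']) pt0
    else pt0
  -- first pass: flat list of 4-char chunks
  let block_text :=
    (PySem.List.pyRange 0 (pt.length : Int) 4).foldl
      (fun acc i => acc ++ [String.ofList (PySem.List.slice pt (some i) (some (i + 4)))]) []
  -- second pass: regroup the chunks four at a time
  (PySem.List.pyRange 0 (block_text.length : Int) 4).foldl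
    (fun acc i => acc ++ [PySem.List.slice block_text (some i) (some (i + 4))]) []

-- ===== PORT B =====
def to_blocks_alt (plain_text : String) : List (List String) :=
  let pt0 := plain_text.toList
  let pt :=
    if pt0.length % 16 ≠ 0 then pt0 ++ List.replicate (16 - pt0.length % 16) 'A' else pt0
  (PySem.List.pyRange 0 (pt.length : Int) 16).foldl
    (fun acc i =>
      acc ++ [(PySem.List.pyRange 0 16 4).map
        (fun j => String.ofList (PySem.List.slice pt (some (i + j)) (some (i + j + 4))))]) []

-- ===== PRECONDITION & SPEC =====
def Spec_to_blocks (plain_text : String) (out : List (List String)) : Prop := out = to_blocks_alt plain_text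
instance (plain_text : String) (out : List (List String)) : Decidable (Spec_to_blocks plain_text out) := by unfold Spec_to_blocks; infer_instance

-- ===== CLAIM (what is proved, stated in full; the proofs are below) =====
def Claim_equal_to_blocks : Prop := ∀ (plain_text : String), Dom_to_blocks plain_text → Spec_to_blocks plain_text (to_blocks plain_text)

-- ===== LEMMAS AND PROOFS =====

-- A foldl over pyRange 0 (s*k) s appending one element per index is a map over range k.
lemma foldl_pyRange_mul {β : Type} (g : Int → β) (sI : Int) (s n k : Nat) (hsI : sI = (s:Int)) (hs : 0 < s) (h : n = s*k) :
  (PySem.List.pyRange 0 (n:Int) sI).foldl (fun acc i => acc ++ [g i]) ([]:List β) =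
  (List.range k).map (fun j => g ((s*j : Nat) : Int)) := by
  subst hsI
  rw [PySem.List.pyRange_of_pos 0 (n:Int) (by exact_mod_cast hs)]
  have hN : (if (0:Int) < (n:Int) then (((n:Int) - 0 + s - 1)/s).toNat else 0) = k := by
    subst h
    rcases Nat.eq_zero_or_pos k with hk | hk
    · simp [hk]
    · have hpos : (0:Int) < ((s*k : Nat) : Int) := by positivity
      rw [if_pos hpos]
      have : ((s*k : Nat) : Int) - 0 + s - 1 = (s - 1 : Int) + s * k := by push_cast; ring
      rw [this, Int.add_mul_ediv_left _ _ (by exact_mod_cast hs.ne')]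
      rw [Int.ediv_eq_zero_of_lt (by omega) (by omega)]
      simp
  rw [hN, List.foldl_map, PySem.List.foldl_append_singleton_eq_map]
  simp only [List.nil_append]
  apply List.map_congr_left
  intro j hj
  congr 1
  push_cast; ring

-- l[m : m+4] for a Nat index m is take 4 of drop m.
lemma slice_nat_add4 {α : Type} (l : List α) (m : Nat) :
    PySem.List.slice l (some (m:Int)) (some ((m:Int)+4)) = (l.drop m).take 4 := by
  rw [show ((m:Int)+4) = ((m+4:Nat):Int) by push_cast; ring, PySem.List.slice_natCast]
  congr 1; omega

lemma range'_four (s : Nat) : List.range' s 4 = [s, s+1, s+2, s+3] := by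
  simp [List.range'_succ]

-- On a 16-aligned char list, A's two chunking passes equal B's single nested pass.
lemma loops_eq (t : List Char) (k : Nat) (h : t.length = 16*k) :
    (let block_text :=
      (PySem.List.pyRange 0 (t.length : Int) 4).foldl
        (fun acc i => acc ++ [String.ofList (PySem.List.slice t (some i) (some (i + 4)))]) [];
     (PySem.List.pyRange 0 (block_text.length : Int) 4).foldl
       (fun acc i => acc ++ [PySem.List.slice block_text (some i) (some (i + 4))]) []) =
    (PySem.List.pyRange 0 (t.length : Int) 16).foldl
      (fun acc i =>
        acc ++ [(PySem.List.pyRange 0 16 4).map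
          (fun j => String.ofList (PySem.List.slice t (some (i + j)) (some (i + j + 4))))]) [] := by
  simp only [h]
  rw [foldl_pyRange_mul (fun i => String.ofList (PySem.List.slice t (some i) (some (i + 4))))
        4 4 (16*k) (4*k) (by norm_num) (by norm_num) (by ring)]
  rw [foldl_pyRange_mul (fun i =>
        (PySem.List.pyRange 0 16 4).map
          (fun j => String.ofList (PySem.List.slice t (some (i + j)) (some (i + j + 4)))))
        16 16 (16*k) k (by norm_num) (by norm_num) rfl]
  rw [show ((List.range (4*k)).map (fun j => String.ofList (PySem.List.slice t (some ((4*j:Nat):Int)) (some (((4*j:Nat):Int) + 4))))).length = ((4*k : Nat):Int) by simp]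
  rw [foldl_pyRange_mul _ 4 4 (4*k) k (by norm_num) (by norm_num) rfl]
  apply List.map_congr_left
  intro i hi
  rw [List.mem_range] at hi
  rw [slice_nat_add4, ← List.map_drop, List.range_eq_range', List.drop_range', ← List.map_take]
  rw [show (4*k - 4*i) = 4 + (4*k - 4*i - 4) by omega, ← List.range'_append, List.take_left']
  · rw [range'_four]
    show _ = List.map _ [0, 4, 8, 12]
    simp only [List.map_cons, List.map_nil, slice_nat_add4]
    rw [show ((16*i:Nat):Int) + 0 = ((16*i+0:Nat):Int) by push_cast; ring]
    rw [show ((16*i:Nat):Int) + 4 = ((16*i+4:Nat):Int) by push_cast; ring]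
    rw [show ((16*i:Nat):Int) + 8 = ((16*i+8:Nat):Int) by push_cast; ring]
    rw [show ((16*i:Nat):Int) + 12 = ((16*i+12:Nat):Int) by push_cast; ring]
    simp only [slice_nat_add4]
    norm_num [show 4*(4*i) = 16*i by ring, show 4*(4*i+1) = 16*i+4 by ring,
      show 4*(4*i+2) = 16*i+8 by ring, show 4*(4*i+3) = 16*i+12 by ring]
  · simp

-- A's char-by-char padding loop builds the same list as B's replicate padding.
lemma pad_eq (l : List Char) (p : Nat) :
    (List.range p).foldl (fun acc _ => acc ++ ['A']) l = l ++ List.replicate p 'A' := by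
  rw [PySem.List.foldl_append_eq_flatMap]
  congr 1
  induction p with
  | zero => simp
  | succ n ih => simp [List.range_succ, ih, List.replicate_succ']

-- ===== VERDICT (by name: the statement is the Claim_ definition above) =====
theorem to_blocks_spec : Claim_equal_to_blocks := by
  intro s _
  unfold Spec_to_blocks
  simp only [to_blocks, to_blocks_alt, pad_eq]
  split_ifs with hm
  · exact loops_eq _ (s.toList.length / 16 + 1)
      (by simp only [List.length_append, List.length_replicate]; omega)
  · exact loops_eq _ (s.toList.length / 16) (by omega)
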